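-- pv_equiv track=rewrite | github.com/MK-Lee13/Algorithm-Study | Programmers/level_1/51_mock_test.py | supo_two
-- ===== SOURCE A (Python) =====
-- def supo_two(answers):
--     answer = 0
--     rules = [1, 3, 4, 5]
--     for i in range(len(answers)):
--         if i % 2 == 0:
--             if answers[i] == 2:
--                 answer += 1
--         else:
--             if answers[i] == rules[(i // 2) % 4]:
--                 answer += 1
--     return answer
-- ===== SOURCE B (Python) =====
-- def supo_two(answers):
--     count = 0
--     rules = [1, 3, 4, 5]
--     it = iter(answers)
--     for a in it:
--         if a == 2:
--             count += 1
--         b = next(it, None)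
--         if b is not None and b == rules[0]:
--             count += 1
--         rules.append(rules.pop(0))
--     return count
-- ===== Notes on version B (the rewrite author's own statement) =====
-- stated objective: alternative
-- what changed: Consumes the list two answers at a time from one iterator with a rotating rules queue (append/pop), so there is no index arithmetic at all - no range(len(..)), no i%2 parity branch and no rules[(i//2)%4] lookup.
import Mathlib
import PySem

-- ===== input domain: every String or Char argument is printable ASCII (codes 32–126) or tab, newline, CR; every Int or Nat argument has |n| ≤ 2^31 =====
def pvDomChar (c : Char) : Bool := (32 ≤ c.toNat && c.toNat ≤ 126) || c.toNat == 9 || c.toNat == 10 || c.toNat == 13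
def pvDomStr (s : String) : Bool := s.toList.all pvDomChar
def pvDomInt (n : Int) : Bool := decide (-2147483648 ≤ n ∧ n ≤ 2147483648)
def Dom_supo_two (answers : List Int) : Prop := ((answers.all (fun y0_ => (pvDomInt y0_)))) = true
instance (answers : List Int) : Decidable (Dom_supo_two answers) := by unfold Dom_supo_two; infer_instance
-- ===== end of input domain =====

-- B consumes the answers two at a time from one iterator with a rotating rules queue,
-- removing all index arithmetic (no range(len(..)), no parity branch, no rules[(i//2)%4]);
-- an alternative decomposition of the same O(n) task.

-- ===== PORT A =====
def supo_two (answers : List Int) : Int :=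
  let rules : List Int := [1, 3, 4, 5]
  (PySem.List.pyRange 0 (PySem.List.len answers) 1).foldl
    (fun answer i =>
      if PySem.Int.mod i 2 == 0 then
        (if PySem.List.pyGetD answers i 0 == 2 then answer + 1 else answer)
      else
        (if PySem.List.pyGetD answers i 0
             == PySem.List.pyGetD rules (PySem.Int.mod (PySem.Int.floordiv i 2) 4) 0
         then answer + 1 else answer)) 0

-- ===== PORT B =====
-- the 'for a in it' loop of Source B: each iteration takes a, then b = next(it, None),
-- then rotates rules by rules.append(rules.pop(0)) (= tail ++ [head]).
def supo_two_go (xs rules : List Int) (count : Int) : Int :=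
  match xs with
  | [] => count
  | a :: rest =>
    let count := if a == 2 then count + 1 else count
    match rest with
    | [] => count        -- b is None: no second test, loop ends after the rotation
    | b :: rest' =>
      let count := if b == PySem.List.pyGetD rules 0 0 then count + 1 else count
      supo_two_go rest' (rules.tail ++ [PySem.List.pyGetD rules 0 0]) count

def supo_two_alt (answers : List Int) : Int :=
  supo_two_go answers [1, 3, 4, 5] 0

-- ===== PRECONDITION & SPEC =====
def Spec_supo_two (answers : List Int) (out : Int) : Prop := out = supo_two_alt answers
instance (answers : List Int) (out : Int) : Decidable (Spec_supo_two answers out) := by unfold Spec_supo_two; infer_instance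

-- ===== CLAIM (what is proved, stated in full; the proofs are below) =====
def Claim_equal_supo_two : Prop := ∀ (answers : List Int), Dom_supo_two answers → Spec_supo_two answers (supo_two answers)

-- ===== LEMMAS AND PROOFS =====

-- The period-8 answer key both programs realize, and A's per-position predicate.
def pvPat8 : List Int := [2, 1, 2, 3, 2, 4, 2, 5]

def pvPred8 (p : Int × Int) : Bool :=
  p.2 == PySem.List.pyGetD pvPat8 (PySem.Int.mod p.1 8) 0

-- the rules queue after k rotations
def pvRot (k : Nat) : List Int :=
  match k % 4 with
  | 0 => [1, 3, 4, 5]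
  | 1 => [3, 4, 5, 1]
  | 2 => [4, 5, 1, 3]
  | _ => [5, 1, 3, 4]

lemma pvRot_step (k : Nat) :
    (pvRot k).tail ++ [PySem.List.pyGetD (pvRot k) 0 0] = pvRot (k + 1) := by
  have h : k % 4 = 0 ∨ k % 4 = 1 ∨ k % 4 = 2 ∨ k % 4 = 3 := by omega
  rcases h with h | h | h | h <;>
    (have h' : (k + 1) % 4 = (k % 4 + 1) % 4 := by omega
     simp [pvRot, h, h', PySem.List.pyGetD, PySem.List.pyGet?, PySem.List.pyIdx?])

-- at an even position 2k the key is 2 (stated with emod, the form simp normalizes to)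
lemma pvPat8_even (k : Nat) :
    PySem.List.pyGetD pvPat8 ((2 * (k : Int)) % 8) 0 = 2 := by
  have h : k % 4 = 0 ∨ k % 4 = 1 ∨ k % 4 = 2 ∨ k % 4 = 3 := by omega
  rcases h with h | h | h | h <;>
    (have h' : (2 * (k : Int)) % 8 = 2 * ((k % 4 : Nat) : Int) := by omega
     rw [h', h]) <;>
    simp [pvPat8, PySem.List.pyGetD, PySem.List.pyGet?, PySem.List.pyIdx?]

-- at an odd position 2k+1 the key is the head of the k-times-rotated rules queue
lemma pvPat8_odd (k : Nat) :
    PySem.List.pyGetD pvPat8 ((2 * (k : Int) + 1) % 8) 0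
      = PySem.List.pyGetD (pvRot k) 0 0 := by
  have h : k % 4 = 0 ∨ k % 4 = 1 ∨ k % 4 = 2 ∨ k % 4 = 3 := by omega
  rcases h with h | h | h | h <;>
    (have h' : (2 * (k : Int) + 1) % 8 = 2 * ((k % 4 : Nat) : Int) + 1 := by omega
     rw [h', h]) <;>
    simp [pvPat8, pvRot, h, PySem.List.pyGetD, PySem.List.pyGet?, PySem.List.pyIdx?]

-- B's pair loop counts exactly the positions matching the period-8 key.
lemma supo_two_go_count (n : Nat) :
    ∀ (xs : List Int), xs.length ≤ n → ∀ (k : Nat) (c : Int),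
      supo_two_go xs (pvRot k) c
        = c + ((PySem.List.enumerate xs (2 * (k : Int))).countP pvPred8 : Int) := by
  induction n with
  | zero =>
    intro xs h k c
    have : xs = [] := List.eq_nil_of_length_eq_zero (by omega)
    subst this
    simp [supo_two_go, PySem.List.enumerate_nil]
  | succ n ih =>
    intro xs h k c
    match xs with
    | [] => simp [supo_two_go, PySem.List.enumerate_nil]
    | [a] =>
      simp only [supo_two_go, PySem.List.enumerate_cons, PySem.List.enumerate_nil,
        List.countP_cons, List.countP_nil]
      have he := pvPat8_even k
      by_cases ha : a = 2
      · simp [pvPred8, ha, he]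
      · have : (a == 2) = false := by simp [ha]
        simp [pvPred8, this, he]
    | a :: b :: rest =>
      have hlen : rest.length ≤ n := by simp at h; omega
      simp only [supo_two_go]
      rw [pvRot_step, ih rest hlen (k + 1)]
      simp only [PySem.List.enumerate_cons, List.countP_cons]
      have he := pvPat8_even k
      have ho := pvPat8_odd k
      have hsh : (2 * (k : Int)) + 1 + 1 = 2 * ((k + 1 : Nat) : Int) := by push_cast; ring
      rw [hsh]
      have h1 : pvPred8 (2 * (k : Int), a) = (a == 2) := by
        simp [pvPred8, he]
      have h2 : pvPred8 (2 * (k : Int) + 1, b) = (b == PySem.List.pyGetD (pvRot k) 0 0) := by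
        simp [pvPred8, ho]
      rw [h1, h2]
      by_cases ha : a = 2 <;> by_cases hb : b = PySem.List.pyGetD (pvRot k) 0 0 <;>
        simp [ha, hb] <;> ring

-- A's per-position test equals a comparison against the period-8 key at i % 8.
lemma supo_two_pred_eq (answers : List Int) (i : Int) (_h0 : 0 ≤ i) :
    (if PySem.Int.mod i 2 == 0 then PySem.List.pyGetD answers i 0 == 2
     else PySem.List.pyGetD answers i 0
          == PySem.List.pyGetD [1, 3, 4, 5] (PySem.Int.mod (PySem.Int.floordiv i 2) 4) 0)
    = (PySem.List.pyGetD answers i 0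
       == PySem.List.pyGetD pvPat8 (PySem.Int.mod i 8) 0) := by
  rw [PySem.Int.mod_eq_emod_of_pos (b := 2) (by norm_num),
      PySem.Int.mod_eq_emod_of_pos (b := 4) (by norm_num),
      PySem.Int.mod_eq_emod_of_pos (b := 8) (by norm_num),
      PySem.Int.floordiv_eq_ediv_of_pos (by norm_num)]
  have h8 : i % 8 = 0 ∨ i % 8 = 1 ∨ i % 8 = 2 ∨ i % 8 = 3 ∨ i % 8 = 4 ∨
      i % 8 = 5 ∨ i % 8 = 6 ∨ i % 8 = 7 := by omega
  rcases h8 with h8 | h8 | h8 | h8 | h8 | h8 | h8 | h8 <;>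
    (have h2 : i % 2 = i % 8 % 2 := by omega
     have h4 : i / 2 % 4 = i % 8 / 2 := by omega
     rw [h2, h4, h8]) <;>
    simp [pvPat8, PySem.List.pyGetD, PySem.List.pyGet?, PySem.List.pyIdx?]

-- ===== VERDICT (by name: the statement is the Claim_ definition above) =====
theorem supo_two_spec : Claim_equal_supo_two := by
  intro answers _
  unfold Spec_supo_two supo_two supo_two_alt
  have hbody :
      (fun (answer i : Int) =>
        if PySem.Int.mod i 2 == 0 then
          (if PySem.List.pyGetD answers i 0 == 2 then answer + 1 else answer)
        else
          (if PySem.List.pyGetD answers i 0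
               == PySem.List.pyGetD [1, 3, 4, 5] (PySem.Int.mod (PySem.Int.floordiv i 2) 4) 0
           then answer + 1 else answer))
      = (fun (answer i : Int) =>
          if (if PySem.Int.mod i 2 == 0 then PySem.List.pyGetD answers i 0 == 2
              else PySem.List.pyGetD answers i 0
                   == PySem.List.pyGetD [1, 3, 4, 5] (PySem.Int.mod (PySem.Int.floordiv i 2) 4) 0)
          then answer + 1 else answer) := by
    funext a i
    cases PySem.Int.mod i 2 == 0 <;> simp
  simp only [hbody]
  rw [PySem.List.foldl_count_if]
  rw [List.countP_congr (fun i hi => by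
    rw [supo_two_pred_eq answers i (PySem.List.mem_pyRange_one.mp hi).1])]
  have hB := supo_two_go_count answers.length answers (le_refl _) 0 0
  have hrot : pvRot 0 = [1, 3, 4, 5] := rfl
  rw [hrot] at hB
  simp only [Nat.cast_zero, mul_zero, zero_add] at hB
  rw [hB, PySem.List.enumerate_eq_map_pyRange answers 0, List.countP_map]
  simp only [Function.comp_def, pvPred8]
  rw [zero_add]
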